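-- pv_equiv track=rewrite | github.com/Cleverfox-samy/fliss-v2 | chat/engine.py | _conversation_mentions_who
-- ===== SOURCE A (Python) =====
-- WHO_INDICATORS = [
--     # Family relationships
--     "mum", "mom", "mother", "dad", "father", "parent", "parents",
--     "nan", "nana", "nanny", "grandmother", "grandma", "grandad",
--     "grandfather", "grandpa", "gran",
--     "son", "daughter", "child", "children", "kid", "kids", "baby",
--     "toddler", "boy", "girl",
--     "wife", "husband", "partner", "spouse",
--     "brother", "sister", "sibling",
--     "uncle", "aunt", "auntie",
--     "friend", "neighbour", "neighbor",
--     # Self-references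
--     "myself", "i need care", "i'm looking for care for me",
--     # Generic person references
--     "year old", "years old", "yo ",
--     "elderly", "loved one",
--     # Possessive patterns that imply who
--     "my ",  # "my mum", "my daughter", etc.
--     "our ",  # "our mother"
-- ]
--
-- def _conversation_mentions_who(messages: list[dict]) -> bool:
--     """Check if any message in the conversation mentions who the care is for."""
--     for msg in messages:
--         if msg.get("role") != "user":
--             continue
--         content = msg.get("content", "")
--         if not isinstance(content, str):
--             continue
--         text = content.lower()
--         for indicator in WHO_INDICATORS:
--             if indicator in text:
--                 return True
--     return False
-- ===== SOURCE B (Python) =====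
-- WHO_INDICATORS = [
--     # Family relationships
--     "mum", "mom", "mother", "dad", "father", "parent", "parents",
--     "nan", "nana", "nanny", "grandmother", "grandma", "grandad",
--     "grandfather", "grandpa", "gran",
--     "son", "daughter", "child", "children", "kid", "kids", "baby",
--     "toddler", "boy", "girl",
--     "wife", "husband", "partner", "spouse",
--     "brother", "sister", "sibling",
--     "uncle", "aunt", "auntie",
--     "friend", "neighbour", "neighbor",
--     # Self-references
--     "myself", "i need care", "i'm looking for care for me",
--     # Generic person references
--     "year old", "years old", "yo ",
--     "elderly", "loved one",
--     # Possessive patterns that imply who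
--     "my ",  # "my mum", "my daughter", etc.
--     "our ",  # "our mother"
-- ]
--
-- # First-character index over the indicators, built once at module level: at each
-- # text position only the few indicators starting with that character are tried.
-- _BUCKETS = {}
-- for _ind in WHO_INDICATORS:
--     _BUCKETS.setdefault(_ind[0], []).append(_ind)
--
--
-- def _conversation_mentions_who(messages: list[dict]) -> bool:
--     """Check if any message in the conversation mentions who the care is for.
--
--     Single left-to-right pass per user message: at each position, only the
--     indicators whose first character matches are tested as a prefix there
--     (correct because a substring occurrence is a prefix at some position,
--     and its first character equals the character at that position).
--     """
--     for msg in messages: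
--         if msg.get("role") != "user":
--             continue
--         content = msg.get("content", "")
--         if not isinstance(content, str):
--             continue
--         text = content.lower()
--         for i, ch in enumerate(text):
--             for ind in _BUCKETS.get(ch, []):
--                 if text.startswith(ind, i):
--                     return True
--     return False
-- ===== Notes on version B (the rewrite author's own statement) =====
-- stated objective: alternative
-- what changed: B builds a first-character bucket index over the indicators once at module level and makes a single left-to-right pass per user message, prefix-testing at each position only the few indicators whose first character matches, instead of A's 49 separate substring scans per message.
import Mathlib
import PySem

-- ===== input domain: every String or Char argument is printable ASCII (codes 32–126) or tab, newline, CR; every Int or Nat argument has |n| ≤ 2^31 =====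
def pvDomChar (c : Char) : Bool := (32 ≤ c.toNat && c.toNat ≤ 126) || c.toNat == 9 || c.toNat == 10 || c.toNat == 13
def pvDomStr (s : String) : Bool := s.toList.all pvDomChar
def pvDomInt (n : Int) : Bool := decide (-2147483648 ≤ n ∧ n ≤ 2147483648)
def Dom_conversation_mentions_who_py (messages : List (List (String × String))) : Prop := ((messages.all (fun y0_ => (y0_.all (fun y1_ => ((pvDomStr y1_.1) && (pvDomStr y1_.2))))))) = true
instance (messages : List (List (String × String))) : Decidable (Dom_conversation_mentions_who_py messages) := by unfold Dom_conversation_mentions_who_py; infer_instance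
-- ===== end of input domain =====

-- B replaces A's 49 per-message substring scans by a single left-to-right pass per
-- message with a first-character bucket index over the indicators (built once),
-- testing only the matching bucket as a prefix at each position.

def whoIndicators : List String := ["mum", "mom", "mother", "dad", "father", "parent", "parents", "nan", "nana", "nanny", "grandmother", "grandma", "grandad", "grandfather", "grandpa", "gran", "son", "daughter", "child", "children", "kid", "kids", "baby", "toddler", "boy", "girl", "wife", "husband", "partner", "spouse", "brother", "sister", "sibling", "uncle", "aunt", "auntie", "friend", "neighbour", "neighbor", "myself", "i need care", "i'm looking for care for me", "year old", "years old", "yo ", "elderly", "loved one", "my ", "our "]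

-- ===== PORT A =====
-- inner 'for indicator in WHO_INDICATORS: if indicator in text: return True'
def aInner : List String → String → Bool
  | [], _ => false
  | ind :: rest, text => if PySem.Str.isIn ind text then true else aInner rest text

-- outer 'for msg in messages: …'
def aOuter : List (List (String × String)) → Bool
  | [] => false
  | msg :: rest =>
    if (PySem.Dict.mk msg).get? "role" ≠ some "user" then aOuter rest
    else
      -- content is typed String here, so Python's isinstance(content, str) guard always holds
      let text := PySem.Str.lower ((PySem.Dict.mk msg).getD "content" "")
      if aInner whoIndicators text then true else aOuter rest

def conversation_mentions_who_py (messages : List (List (String × String))) : Bool :=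
  aOuter messages

-- ===== PORT B =====
-- module-level build: for _ind in WHO_INDICATORS: _BUCKETS.setdefault(_ind[0], []).append(_ind)
def buildBuckets : List String → PySem.Dict Char (List String) → PySem.Dict Char (List String)
  | [], d => d
  | ind :: rest, d =>
    match ind.toList with
    | [] => buildBuckets rest d  -- unreachable: every indicator is nonempty (ind[0] would raise)
    | c :: _ => buildBuckets rest (d.insert c ((d.getD c []) ++ [ind]))

def pvBuckets : PySem.Dict Char (List String) := buildBuckets whoIndicators PySem.Dict.empty

-- 'for i, ch in enumerate(text): for ind in _BUCKETS.get(ch, []): if text.startswith(ind, i): return True'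
-- text.startswith(ind, i) with 0 ≤ i ≤ len(text) is exactly a prefix test on the drop — exact here
def bScan (chars : List Char) : Bool :=
  (PySem.List.enumerate chars 0).any (fun p =>
    (pvBuckets.getD p.2 []).any (fun ind =>
      PySem.Chars.startswith (chars.drop p.1.toNat) ind.toList))

def bOuter : List (List (String × String)) → Bool
  | [] => false
  | msg :: rest =>
    if (PySem.Dict.mk msg).get? "role" ≠ some "user" then bOuter rest
    else
      let text := PySem.Str.lower ((PySem.Dict.mk msg).getD "content" "")
      if bScan text.toList then true else bOuter rest

def conversation_mentions_who_py_alt (messages : List (List (String × String))) : Bool :=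
  bOuter messages

-- ===== PRECONDITION & SPEC =====
def Spec_conversation_mentions_who_py (messages : List (List (String × String))) (out : Bool) : Prop := out = conversation_mentions_who_py_alt messages
instance (messages : List (List (String × String))) (out : Bool) : Decidable (Spec_conversation_mentions_who_py messages out) := by unfold Spec_conversation_mentions_who_py; infer_instance

-- ===== CLAIM (what is proved, stated in full; the proofs are below) =====
def Claim_equal_conversation_mentions_who_py : Prop := ∀ (messages : List (List (String × String))), Dom_conversation_mentions_who_py messages → Spec_conversation_mentions_who_py messages (conversation_mentions_who_py messages)

-- ===== LEMMAS AND PROOFS =====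

-- A's inner early-return loop is an existence check over the indicator list
theorem aInner_eq_any (inds : List String) (text : String) :
    aInner inds text = inds.any (fun ind => PySem.Str.isIn ind text) := by
  induction inds with
  | nil => rfl
  | cons i rest ih => by_cases h : PySem.Str.isIn i text <;> simp only [aInner, h, List.any_cons, ih, Bool.false_eq_true, if_true, if_false, Bool.false_or, Bool.true_or]

-- what the bucket build produces: searching the bucket of ch is searching the
-- indicators whose first character is ch
theorem any_getD_build (L : List String) (d : PySem.Dict Char (List String)) (ch : Char) (p : String → Bool) :
    ((buildBuckets L d).getD ch []).any p
      = (((d.getD ch []).any p) || L.any (fun ind => (ind.toList.head? == some ch) && p ind)) := by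
  induction L generalizing d with
  | nil => simp [buildBuckets]
  | cons ind rest ih =>
    cases hcl : ind.toList with
    | nil => simp [buildBuckets, hcl, ih]
    | cons c t =>
      simp only [buildBuckets, hcl, ih, List.any_cons]
      rw [PySem.Dict.getD_insert]
      by_cases hc : ch = c
      · subst hc
        simp [Bool.or_assoc]
      · rw [if_neg hc]
        have hcc : (c == ch) = false := by
          simp only [beq_eq_false_iff_ne, ne_eq]
          exact fun h => hc h.symm
        simp [hcc]

theorem any_bucket (ch : Char) (p : String → Bool) :
    (pvBuckets.getD ch []).any p
      = whoIndicators.any (fun ind => (ind.toList.head? == some ch) && p ind) := by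
  have h0 : (PySem.Dict.empty : PySem.Dict Char (List String)).getD ch [] = [] := rfl
  rw [pvBuckets, any_getD_build, h0]
  simp

theorem whoIndicators_nonempty : ∀ s ∈ whoIndicators, s.toList ≠ [] := by decide

-- B's bucketed position scan finds exactly the texts containing some indicator
theorem bScan_eq (chars : List Char) :
    bScan chars = whoIndicators.any (fun ind => PySem.Chars.isIn ind.toList chars) := by
  rw [Bool.eq_iff_iff]
  simp only [bScan, List.any_eq_true, any_bucket, ← PySem.Chars.exists_prefix_drop_iff_isIn,
    PySem.List.mem_enumerate_iff, Bool.and_eq_true, beq_iff_eq, PySem.Chars.startswith_iff]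
  constructor
  · rintro ⟨p, ⟨k, hk, rfl⟩, ind, hind, _, hpre⟩
    exact ⟨ind, hind, k, by simpa using hpre⟩
  · rintro ⟨ind, hind, j, hpre⟩
    have hne := whoIndicators_nonempty ind hind
    have hlen : ind.toList.length ≤ (chars.drop j).length := hpre.length_le
    have hj : j < chars.length := by
      rcases List.exists_cons_of_ne_nil hne with ⟨c, t, hct⟩
      simp [hct, List.length_drop] at hlen
      omega
    refine ⟨((j : Int), chars[j]), ⟨j, hj, by simp⟩, ind, hind, ?_, by simpa using hpre⟩
    have : ind.toList.head? = (chars.drop j).head? := by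
      rcases hpre with ⟨t2, ht2⟩
      rcases List.exists_cons_of_ne_nil hne with ⟨c, t, hct⟩
      simp [← ht2, hct]
    simp [this, List.head?_drop, List.getElem?_eq_getElem hj]

-- the two outer loops agree message by message
theorem outer_eq (messages : List (List (String × String))) :
    bOuter messages = aOuter messages := by
  induction messages with
  | nil => rfl
  | cons msg rest ih =>
    simp only [aOuter, bOuter, ih, aInner_eq_any, bScan_eq]
    simp [PySem.Str.isIn_eq]

-- ===== VERDICT (by name: the statement is the Claim_ definition above) =====
theorem conversation_mentions_who_py_spec : Claim_equal_conversation_mentions_who_py := by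
  intro messages _
  unfold Spec_conversation_mentions_who_py conversation_mentions_who_py conversation_mentions_who_py_alt
  rw [outer_eq]
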